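-- pv_equiv track=rewrite | github.com/Czubbi/GraphNeuralNetworks-ICAPS | src/model/postprocessing.py | results_for_percentage
-- ===== SOURCE A (Python) =====
-- def results_for_percentage(percentage_indicies_map, number_of_samples):
--     # Key is the percentage the values are the classification results
--     is_good_action_map = {}
--     for percentage, result_set in percentage_indicies_map.items():
--         current_result = []
--         for i in range(number_of_samples):
--             current_result.append(1) if i in result_set else current_result.append(0)
--
--         is_good_action_map[percentage] = current_result
--
--     return is_good_action_map
-- ===== SOURCE B (Python) =====
-- def results_for_percentage(percentage_indicies_map, number_of_samples):
--     # Gap-fill: sort the in-range members and emit runs of 0s between consecutive 1s,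
--     # instead of scanning every sample index and membership-testing it.
--     is_good_action_map = {}
--     for percentage, result_set in percentage_indicies_map.items():
--         hits = sorted({i for i in result_set if 0 <= i < number_of_samples})
--         row = []
--         prev = 0
--         for h in hits:
--             row.extend([0] * (h - prev))
--             row.append(1)
--             prev = h + 1
--         row.extend([0] * (number_of_samples - prev))
--         is_good_action_map[percentage] = row
--     return is_good_action_map
-- ===== Notes on version B (the rewrite author's own statement) =====
-- stated objective: alternative
-- what changed: Per percentage, B sorts the distinct in-range members of the set and builds the row by gap-filling runs of zeros between consecutive ones, instead of scanning every sample index and membership-testing it against the set.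
import Mathlib
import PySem

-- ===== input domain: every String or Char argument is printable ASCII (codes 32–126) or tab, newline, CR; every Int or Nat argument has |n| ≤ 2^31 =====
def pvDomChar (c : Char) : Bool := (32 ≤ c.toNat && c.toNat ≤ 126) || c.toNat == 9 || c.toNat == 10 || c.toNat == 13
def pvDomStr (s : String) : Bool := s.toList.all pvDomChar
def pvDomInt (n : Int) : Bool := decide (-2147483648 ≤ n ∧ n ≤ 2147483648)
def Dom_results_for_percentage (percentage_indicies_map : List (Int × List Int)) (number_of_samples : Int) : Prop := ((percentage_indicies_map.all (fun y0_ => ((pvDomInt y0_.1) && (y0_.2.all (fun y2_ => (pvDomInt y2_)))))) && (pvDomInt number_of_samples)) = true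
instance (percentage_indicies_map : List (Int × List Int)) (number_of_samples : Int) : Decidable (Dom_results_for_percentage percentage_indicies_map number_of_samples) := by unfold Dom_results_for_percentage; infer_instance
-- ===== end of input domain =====

-- B builds each row by sorting the distinct in-range members and gap-filling zero runs between ones, instead of membership-testing every sample index (alternative algorithm, similar cost).


-- ===== PORT A =====
-- for each percentage: scan every i in range(n), appending 1 if i is in the set else 0
def results_for_percentage (percentage_indicies_map : List (Int × List Int)) (number_of_samples : Int) : List (Int × List Int) :=
  (percentage_indicies_map.foldl
    (fun (acc : PySem.Dict Int (List Int)) p =>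
      acc.insert p.1
        ((PySem.List.pyRange 0 number_of_samples 1).foldl
          (fun cr i => if p.2.contains i then cr ++ [(1 : Int)] else cr ++ [(0 : Int)]) []))
    PySem.Dict.empty).items

-- ===== PORT B =====
-- for each percentage: hits = sorted({i in set | 0 <= i < n}); emit [0]*(h-prev) ++ [1] per hit, then the trailing zeros
def results_for_percentage_alt (percentage_indicies_map : List (Int × List Int)) (number_of_samples : Int) : List (Int × List Int) :=
  (percentage_indicies_map.foldl
    (fun (acc : PySem.Dict Int (List Int)) p =>
      let hits := PySem.List.sorted
        (PySem.Set.ofList (p.2.filter (fun i => decide (0 ≤ i) && decide (i < number_of_samples))))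
        (fun x => x) false
      let st := hits.foldl
        (fun (st : List Int × Int) h =>
          (st.1 ++ List.replicate (h - st.2).toNat (0 : Int) ++ [(1 : Int)], h + 1))
        (([] : List Int), (0 : Int))
      acc.insert p.1 (st.1 ++ List.replicate (number_of_samples - st.2).toNat (0 : Int)))
    PySem.Dict.empty).items

-- ===== PRECONDITION & SPEC =====
def Spec_results_for_percentage (percentage_indicies_map : List (Int × List Int)) (number_of_samples : Int) (out : List (Int × List Int)) : Prop := out = results_for_percentage_alt percentage_indicies_map number_of_samples
instance (percentage_indicies_map : List (Int × List Int)) (number_of_samples : Int) (out : List (Int × List Int)) : Decidable (Spec_results_for_percentage percentage_indicies_map number_of_samples out) := by unfold Spec_results_for_percentage; infer_instance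

-- ===== CLAIM (what is proved, stated in full; the proofs are below) =====
def Claim_equal_results_for_percentage : Prop := ∀ (percentage_indicies_map : List (Int × List Int)) (number_of_samples : Int), Dom_results_for_percentage percentage_indicies_map number_of_samples → Spec_results_for_percentage percentage_indicies_map number_of_samples (results_for_percentage percentage_indicies_map number_of_samples)

-- ===== LEMMAS AND PROOFS =====

-- A's inner loop appends one element per index: it is the map over the range.
theorem pv_foldl_ite_append (xs : List Int) (l : List Int) (acc : List Int) :
    l.foldl (fun cr i => if xs.contains i then cr ++ [(1 : Int)] else cr ++ [(0 : Int)]) acc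
      = acc ++ l.map (fun i => if xs.contains i then (1 : Int) else 0) := by
  induction l generalizing acc with
  | nil => simp
  | cons i l ih =>
    simp only [List.foldl_cons, List.map_cons]
    by_cases h : xs.contains i = true
    · rw [if_pos h, if_pos h, ih]; simp
    · rw [if_neg h, if_neg h, ih]; simp

-- the gap-filled row as a structural recursion on the sorted hit list
def pvGap : List Int → Int → Int → List Int
  | [], prev, n => List.replicate (n - prev).toNat 0
  | h :: t, prev, n => List.replicate (h - prev).toNat 0 ++ [1] ++ pvGap t (h + 1) n

-- B's foldl plus its trailing zeros IS pvGap.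
theorem pv_foldl_gap (n : Int) (hits : List Int) (acc : List Int) (prev : Int) :
    (hits.foldl
        (fun (st : List Int × Int) h =>
          (st.1 ++ List.replicate (h - st.2).toNat (0 : Int) ++ [(1 : Int)], h + 1))
        (acc, prev)).1
      ++ List.replicate (n - (hits.foldl
        (fun (st : List Int × Int) h =>
          (st.1 ++ List.replicate (h - st.2).toNat (0 : Int) ++ [(1 : Int)], h + 1))
        (acc, prev)).2).toNat (0 : Int)
      = acc ++ pvGap hits prev n := by
  induction hits generalizing acc prev with
  | nil => simp [pvGap]
  | cons h t ih =>
    simp only [List.foldl_cons, pvGap]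
    rw [ih]
    simp

-- pvGap on a strictly increasing, in-window list is the 0/1 membership map over the range.
theorem pv_gap_eq_map (hits : List Int) (prev n : Int)
    (hs : hits.Pairwise (· < ·)) (hb : ∀ h ∈ hits, prev ≤ h ∧ h < n) :
    pvGap hits prev n
      = (PySem.List.pyRange prev n 1).map (fun i => if hits.contains i then (1 : Int) else 0) := by
  induction hits generalizing prev with
  | nil =>
    simp only [pvGap]
    rw [PySem.List.pyRange_one]
    simp [List.map_map, Function.comp_def, List.map_const']
  | cons h t ih =>
    obtain ⟨hph, hhn⟩ := hb h (List.mem_cons_self ..)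
    have ht_gt : ∀ x ∈ t, h < x := (List.pairwise_cons.mp hs).1
    have hrange := PySem.List.pyRange_one_append prev h n hph (le_of_lt hhn)
    have hcons := PySem.List.pyRange_one_cons (a := h) (b := n) hhn
    have e1 : (PySem.List.pyRange prev h 1).map
        (fun i => if (h :: t).contains i then (1 : Int) else 0)
        = List.replicate (h - prev).toNat 0 := by
      have hc : ∀ i ∈ PySem.List.pyRange prev h 1,
          (if (h :: t).contains i then (1 : Int) else 0) = (fun _ : Int => (0 : Int)) i := by
        intro i hi
        have hi' := (PySem.List.mem_pyRange_one).mp hi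
        have hnot : i ∉ (h :: t) := by
          intro hm
          rcases List.mem_cons.mp hm with rfl | hm
          · omega
          · exact absurd (ht_gt i hm) (by omega)
        simp [hnot]
      rw [List.map_congr_left hc]
      simp [List.map_const', PySem.List.length_pyRange_one]
    have e2 : (if (h :: t).contains h then (1 : Int) else 0) = 1 := by simp
    have e3 : (PySem.List.pyRange (h + 1) n 1).map
        (fun i => if (h :: t).contains i then (1 : Int) else 0) = pvGap t (h + 1) n := by
      rw [ih (h + 1) (List.pairwise_cons.mp hs).2
        (fun x hx => ⟨by have := ht_gt x hx; omega, (hb x (List.mem_cons_of_mem _ hx)).2⟩)]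
      apply List.map_congr_left
      intro i hi
      have hi' := (PySem.List.mem_pyRange_one).mp hi
      have hne : i ≠ h := by omega
      by_cases hm : i ∈ t
      · simp [hm]
      · simp [hm, hne]
    rw [hrange, hcons, List.map_append, List.map_cons, e1, e2, e3]
    simp [pvGap]

-- per entry, A's membership scan equals B's gap fill
theorem pv_row_eq (n : Int) (s : List Int) :
    (PySem.List.pyRange 0 n 1).foldl
        (fun cr i => if s.contains i then cr ++ [(1 : Int)] else cr ++ [(0 : Int)]) []
      = (let hits := PySem.List.sorted
            (PySem.Set.ofList (s.filter (fun i => decide (0 ≤ i) && decide (i < n))))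
            (fun x => x) false
         let st := hits.foldl
            (fun (st : List Int × Int) h =>
              (st.1 ++ List.replicate (h - st.2).toNat (0 : Int) ++ [(1 : Int)], h + 1))
            (([] : List Int), (0 : Int))
         st.1 ++ List.replicate (n - st.2).toNat (0 : Int)) := by
  set hits := PySem.List.sorted
      (PySem.Set.ofList (s.filter (fun i => decide (0 ≤ i) && decide (i < n))))
      (fun x => x) false with hhits
  have hmem : ∀ i : Int, i ∈ hits ↔ (i ∈ s ∧ 0 ≤ i ∧ i < n) := by
    intro i
    rw [hhits, PySem.List.mem_sorted, PySem.Set.mem_ofList, List.mem_filter]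
    simp
  have hpair : hits.Pairwise (· < ·) := by
    rw [hhits]; exact PySem.List.sorted_ofList_pairwise_lt _
  rw [pv_foldl_ite_append, List.nil_append]
  show _ = _ ++ List.replicate _ _
  rw [pv_foldl_gap n hits [] 0, List.nil_append]
  rw [pv_gap_eq_map hits 0 n hpair
      (by intro h hh; have := (hmem h).mp hh; exact ⟨this.2.1, this.2.2⟩)]
  apply List.map_congr_left
  intro i hi
  have hi' := (PySem.List.mem_pyRange_one).mp hi
  have : hits.contains i = s.contains i := by
    by_cases hc : i ∈ s
    · have : i ∈ hits := (hmem i).mpr ⟨hc, hi'.1, hi'.2⟩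
      simp [hc, this]
    · have : i ∉ hits := fun hh => hc ((hmem i).mp hh).1
      simp [hc, this]
  rw [this]

-- ===== VERDICT (by name: the statement is the Claim_ definition above) =====
theorem results_for_percentage_spec : Claim_equal_results_for_percentage := by
  intro m n _
  unfold Spec_results_for_percentage results_for_percentage results_for_percentage_alt
  have hf : ∀ (acc : PySem.Dict Int (List Int)) (p : Int × List Int),
      acc.insert p.1
        ((PySem.List.pyRange 0 n 1).foldl
          (fun cr i => if p.2.contains i then cr ++ [(1 : Int)] else cr ++ [(0 : Int)]) [])
      = acc.insert p.1
        (let hits := PySem.List.sorted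
            (PySem.Set.ofList (p.2.filter (fun i => decide (0 ≤ i) && decide (i < n))))
            (fun x => x) false
         let st := hits.foldl
            (fun (st : List Int × Int) h =>
              (st.1 ++ List.replicate (h - st.2).toNat (0 : Int) ++ [(1 : Int)], h + 1))
            (([] : List Int), (0 : Int))
         st.1 ++ List.replicate (n - st.2).toNat (0 : Int)) := by
    intro acc p
    rw [pv_row_eq]
  have : (fun (acc : PySem.Dict Int (List Int)) (p : Int × List Int) =>
      acc.insert p.1
        ((PySem.List.pyRange 0 n 1).foldl
          (fun cr i => if p.2.contains i then cr ++ [(1 : Int)] else cr ++ [(0 : Int)]) []))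
    = (fun (acc : PySem.Dict Int (List Int)) (p : Int × List Int) =>
      acc.insert p.1
        (let hits := PySem.List.sorted
            (PySem.Set.ofList (p.2.filter (fun i => decide (0 ≤ i) && decide (i < n))))
            (fun x => x) false
         let st := hits.foldl
            (fun (st : List Int × Int) h =>
              (st.1 ++ List.replicate (h - st.2).toNat (0 : Int) ++ [(1 : Int)], h + 1))
            (([] : List Int), (0 : Int))
         st.1 ++ List.replicate (n - st.2).toNat (0 : Int))) := by
    funext acc p; exact hf acc p
  rw [this]
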